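-- pv_equiv track=rewrite | github.com/viketss/python | guide3/2-imprimir-matrices.py | generar_matriz_e
-- ===== SOURCE A (Python) =====
-- def generar_matriz_e(n):
--     """Genera la matriz 'e' de tamaño NxN con un 0 entre cada número, incrementando en toda la matriz."""
--     matriz = [[0 for _ in range(n)] for _ in range(n)]
--     contador = 1  # Contador para los números
--     for i in range(n):
--         for j in range(n):
--             if (i + j) % 2 == 1:  # Alternar entre números y ceros
--                 matriz[i][j] = contador
--                 contador += 1
--     return matriz
-- ===== SOURCE B (Python) =====
-- def generar_matriz_e(n):
--     """Genera la matriz 'e' de tamaño NxN con un 0 entre cada número, incrementando en toda la matriz."""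
--     def valor(i, j):
--         if (i + j) % 2 == 0:
--             return 0
--         antes_filas = (i // 2) * n + (n // 2 if i % 2 == 1 else 0)
--         antes_fila = (j + 1) // 2 if i % 2 == 1 else j // 2
--         return antes_filas + antes_fila + 1
--     return [[valor(i, j) for j in range(n)] for i in range(n)]
-- ===== Notes on version B (the rewrite author's own statement) =====
-- stated objective: alternative
-- what changed: Replaces the sequential running counter threaded through nested mutating loops by a closed-form per-cell formula (count of earlier odd-parity cells in row-major order), so every entry is computed independently.
import Mathlib
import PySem

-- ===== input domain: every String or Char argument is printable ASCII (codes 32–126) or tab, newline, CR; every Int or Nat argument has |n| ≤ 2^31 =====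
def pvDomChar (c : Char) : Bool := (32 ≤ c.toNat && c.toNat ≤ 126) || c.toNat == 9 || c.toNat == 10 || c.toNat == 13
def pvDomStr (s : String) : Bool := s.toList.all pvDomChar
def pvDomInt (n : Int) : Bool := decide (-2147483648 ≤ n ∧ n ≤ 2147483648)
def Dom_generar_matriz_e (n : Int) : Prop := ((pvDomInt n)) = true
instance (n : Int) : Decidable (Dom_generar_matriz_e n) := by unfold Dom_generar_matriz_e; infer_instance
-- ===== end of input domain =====

-- B replaces A's running counter threaded through nested mutating loops by a closed-form
-- per-cell formula (count of earlier odd-parity cells in row-major order); same cost, no state.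

-- ===== PORT A =====
def generar_matriz_e (n : Int) : List (List Int) :=
  let matriz : List (List Int) :=
    (PySem.List.pyRange 0 n 1).map (fun _ =>
      (PySem.List.pyRange 0 n 1).map (fun _ => (0 : Int)))
  let st : List (List Int) × Int :=
    (PySem.List.pyRange 0 n 1).foldl (fun st i =>
      (PySem.List.pyRange 0 n 1).foldl (fun st j =>
        if PySem.Int.mod (i + j) 2 = 1 then
          (PySem.List.pySetD st.1 i
             (PySem.List.pySetD (PySem.List.pyGetD st.1 i []) j st.2), st.2 + 1)
        else st) st) (matriz, 1)
  st.1

-- ===== PORT B =====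
def pvValor (n i j : Int) : Int :=
  if PySem.Int.mod (i + j) 2 = 0 then 0
  else
    let antes_filas : Int :=
      PySem.Int.floordiv i 2 * n +
        (if PySem.Int.mod i 2 = 1 then PySem.Int.floordiv n 2 else 0)
    let antes_fila : Int :=
      if PySem.Int.mod i 2 = 1 then PySem.Int.floordiv (j + 1) 2
      else PySem.Int.floordiv j 2
    antes_filas + antes_fila + 1

def generar_matriz_e_alt (n : Int) : List (List Int) :=
  (PySem.List.pyRange 0 n 1).map (fun i =>
    (PySem.List.pyRange 0 n 1).map (fun j => pvValor n i j))

-- ===== PRECONDITION & SPEC =====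
def Spec_generar_matriz_e (n : Int) (out : List (List Int)) : Prop := out = generar_matriz_e_alt n
instance (n : Int) (out : List (List Int)) : Decidable (Spec_generar_matriz_e n out) := by unfold Spec_generar_matriz_e; infer_instance

-- ===== CLAIM (what is proved, stated in full; the proofs are below) =====
def Claim_equal_generar_matriz_e : Prop := ∀ (n : Int), Dom_generar_matriz_e n → Spec_generar_matriz_e n (generar_matriz_e n)

-- ===== LEMMAS AND PROOFS =====

-- number of odd-parity cells in row i among columns < j
def pvCnt (i j : Nat) : Nat := if i % 2 = 0 then j / 2 else (j + 1) / 2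
-- number of odd-parity cells in rows < m (of an n-column matrix)
def pvTot (n m : Nat) : Nat := (m / 2) * n + (if m % 2 = 1 then n / 2 else 0)
-- the value A's counter writes at cell (i, j) (0 on even-parity cells)
def pvVal (n i j : Nat) : Int := if (i + j) % 2 = 1 then ((1 + pvTot n i + pvCnt i j : Nat) : Int) else 0
-- matrix state after r full rows and the first t columns of row r
def pvMat (n t r : Nat) : List (List Int) :=
  (List.range n).map (fun i =>
    if i < r then (List.range n).map (fun j => pvVal n i j)
    else if i = r then (List.range n).map (fun j => if j < t then pvVal n r j else 0)
    else (List.range n).map (fun _ => (0 : Int)))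

-- counting lemmas
theorem pvCnt_succ (i t : Nat) :
    pvCnt i (t + 1) = pvCnt i t + (if (i + t) % 2 = 1 then 1 else 0) := by
  unfold pvCnt; split_ifs <;> omega

theorem pvTot_succ (n m : Nat) : pvTot n (m + 1) = pvTot n m + pvCnt m n := by
  unfold pvTot pvCnt
  rcases Nat.even_or_odd m with ⟨k, hk⟩ | ⟨k, hk⟩ <;> subst hk
  · have h1 : (k + k + 1) / 2 = k := by omega
    have h2 : (k + k) / 2 = k := by omega
    have h3 : (k + k + 1) % 2 = 1 := by omega
    have h4 : (k + k) % 2 = 0 := by omega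
    simp only [h1, h2, h3, h4]
    norm_num
  · have h1 : (2 * k + 1 + 1) / 2 = k + 1 := by omega
    have h2 : (2 * k + 1) / 2 = k := by omega
    have h3 : (2 * k + 1 + 1) % 2 = 0 := by omega
    have h4 : (2 * k + 1) % 2 = 1 := by omega
    simp only [h1, h2, h3, h4]
    norm_num [Nat.succ_mul]
    have h5 : n / 2 + (n + 1) / 2 = n := by omega
    generalize k * n = t
    omega

theorem pvMat_getD (n t r : Nat) (hr : r < n) :
    PySem.List.pyGetD (pvMat n t r) (r : Int) [] =
      (List.range n).map (fun j => if j < t then pvVal n r j else (0 : Int)) := by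
  rw [PySem.List.pyGetD_natCast]
  simp [pvMat, List.getD, hr]

theorem pvRow_set (n t r : Nat) (ht : t < n) (h : (r + t) % 2 = 1) :
    ((List.range n).map (fun j => if j < t then pvVal n r j else (0 : Int))).set t
        ((1 + pvTot n r + pvCnt r t : Nat) : Int) =
      (List.range n).map (fun j => if j < t + 1 then pvVal n r j else (0 : Int)) := by
  apply List.ext_getElem (by simp)
  intro j hj hj'
  simp only [List.getElem_set, List.getElem_map, List.getElem_range]
  by_cases hjt : t = j
  · subst hjt
    simp [pvVal, h]
  · have h1 : (j < t + 1) ↔ (j < t) := by omega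
    simp [hjt, h1]

theorem pvRow_stable (n t r : Nat) (h : (r + t) % 2 = 0) :
    (List.range n).map (fun j => if j < t + 1 then pvVal n r j else (0 : Int)) =
      (List.range n).map (fun j => if j < t then pvVal n r j else (0 : Int)) := by
  apply List.map_congr_left
  intro j hj
  by_cases hjt : j = t
  · subst hjt
    simp [pvVal, h]
  · have h1 : (j < t + 1) ↔ (j < t) := by omega
    simp [h1]

theorem pvMat_set_row (n t t' r : Nat) :
    (pvMat n t r).set r ((List.range n).map (fun j => if j < t' then pvVal n r j else (0 : Int)))
      = pvMat n t' r := by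
  apply List.ext_getElem (by simp [pvMat])
  intro i hi hi'
  simp only [pvMat, List.getElem_set, List.getElem_map, List.getElem_range]
  by_cases hir : i = r
  · subst hir
    simp
  · have hri : ¬r = i := fun h => hir h.symm
    simp [hir, hri]

theorem pvMat_stable (n t r : Nat) (h : (r + t) % 2 = 0) :
    pvMat n (t + 1) r = pvMat n t r := by
  unfold pvMat
  apply List.map_congr_left
  intro i hi
  by_cases hir : i = r
  · subst hir
    rw [if_neg (Nat.lt_irrefl i), if_neg (Nat.lt_irrefl i), if_pos rfl, if_pos rfl,
        pvRow_stable n t i h]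
  · simp [hir]

-- inner loop invariant: processing column t of row r advances pvMat / the counter
theorem inner_step (n r t : Nat) (hr : r < n) (ht : t < n) :
    (if PySem.Int.mod ((r : Int) + (t : Int)) 2 = 1 then
      ((PySem.List.pySetD (pvMat n t r) (r : Int)
          (PySem.List.pySetD (PySem.List.pyGetD (pvMat n t r) (r : Int) []) (t : Int)
            ((1 + pvTot n r + pvCnt r t : Nat) : Int))),
        ((1 + pvTot n r + pvCnt r t : Nat) : Int) + 1)
     else (pvMat n t r, ((1 + pvTot n r + pvCnt r t : Nat) : Int)))
    = (pvMat n (t + 1) r, ((1 + pvTot n r + pvCnt r (t + 1) : Nat) : Int)) := by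
  have hcast : (r : Int) + (t : Int) = ((r + t : Nat) : Int) := by push_cast; ring
  rw [hcast, show (2 : Int) = ((2 : Nat) : Int) from rfl, PySem.Int.mod_natCast]
  by_cases hpar : (r + t) % 2 = 1
  · have hc : (((r + t) % 2 : Nat) : Int) = 1 := by exact_mod_cast congrArg Nat.cast hpar
    rw [if_pos hc, pvMat_getD n t r hr, PySem.List.pySetD_natCast, PySem.List.pySetD_natCast,
        pvRow_set n t r ht hpar, pvMat_set_row n t (t + 1) r]
    have hcnt : pvCnt r (t + 1) = pvCnt r t + 1 := by rw [pvCnt_succ]; simp [hpar]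
    rw [hcnt]
    simp only [Prod.mk.injEq]
    exact ⟨trivial, by push_cast; ring⟩
  · have h0 : (r + t) % 2 = 0 := by omega
    have hc : ¬(((r + t) % 2 : Nat) : Int) = 1 := by
      rw [h0]; norm_num
    rw [if_neg hc]
    have hcnt : pvCnt r (t + 1) = pvCnt r t := by rw [pvCnt_succ]; simp [hpar]
    rw [pvMat_stable n t r h0, hcnt]

theorem pvMat_complete (n r : Nat) : pvMat n n r = pvMat n 0 (r + 1) := by
  unfold pvMat
  apply List.map_congr_left
  intro i hi
  rw [List.mem_range] at hi
  by_cases h1 : i < r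
  · have h2 : i < r + 1 := by omega
    simp [h1, h2]
  · by_cases h2 : i = r
    · subst h2
      have h3 : i < i + 1 := by omega
      rw [if_neg h1, if_pos rfl, if_pos h3]
      exact List.map_congr_left (fun j hj => by rw [List.mem_range] at hj; simp [hj])
    · have h3 : ¬i < r + 1 := by omega
      have h4 : ¬i = r + 1 ∨ True := Or.inr trivial
      by_cases h5 : i = r + 1
      · simp [h1, h2, h3, h5]
      · simp [h1, h2, h3, h5]

theorem inner_loop (n r : Nat) (hr : r < n) : ∀ t, t ≤ n →
    ((List.range t).map Int.ofNat).foldl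
      (fun (st : List (List Int) × Int) j =>
        if PySem.Int.mod ((r : Int) + j) 2 = 1 then
          (PySem.List.pySetD st.1 (r : Int)
             (PySem.List.pySetD (PySem.List.pyGetD st.1 (r : Int) []) j st.2), st.2 + 1)
        else st)
      (pvMat n 0 r, ((1 + pvTot n r : Nat) : Int))
    = (pvMat n t r, ((1 + pvTot n r + pvCnt r t : Nat) : Int)) := by
  intro t
  induction t with
  | zero => intro _; simp [pvCnt]
  | succ t ih =>
    intro ht
    rw [List.range_succ, List.map_append, List.foldl_append, ih (by omega)]
    simpa using inner_step n r t hr (by omega)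

theorem outer_loop (n : Nat) : ∀ r, r ≤ n →
    ((List.range r).map Int.ofNat).foldl
      (fun (st : List (List Int) × Int) i =>
        ((List.range n).map Int.ofNat).foldl
          (fun (st : List (List Int) × Int) j =>
            if PySem.Int.mod (i + j) 2 = 1 then
              (PySem.List.pySetD st.1 i
                 (PySem.List.pySetD (PySem.List.pyGetD st.1 i []) j st.2), st.2 + 1)
            else st) st)
      (pvMat n 0 0, 1)
    = (pvMat n 0 r, ((1 + pvTot n r : Nat) : Int)) := by
  intro r
  induction r with
  | zero => intro _; simp [pvTot]
  | succ r ih =>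
    intro hr
    rw [List.range_succ, List.map_append, List.foldl_append, ih (by omega)]
    simp only [List.foldl_cons, List.foldl_nil, List.map_cons, List.map_nil,
      Int.ofNat_eq_natCast]
    rw [inner_loop n r (by omega) n (le_refl n), pvMat_complete, pvTot_succ, Nat.add_assoc]

theorem pyRange_cast (n : Int) :
    PySem.List.pyRange 0 n 1 = (List.range n.toNat).map Int.ofNat := by
  rw [PySem.List.pyRange_one]
  simp

theorem valor_eq (N i j : Nat) (hi : i < N) (hj : j < N) :
    pvValor (N : Int) (i : Int) (j : Int) = pvVal N i j := by
  unfold pvValor pvVal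
  have hc2 : (2 : Int) = ((2 : Nat) : Int) := rfl
  have hij : (i : Int) + (j : Int) = ((i + j : Nat) : Int) := by push_cast; ring
  have hj1 : (j : Int) + 1 = ((j + 1 : Nat) : Int) := by push_cast; ring
  rw [hij, hc2, PySem.Int.mod_natCast, PySem.Int.mod_natCast, hj1,
      PySem.Int.floordiv_natCast, PySem.Int.floordiv_natCast, PySem.Int.floordiv_natCast,
      PySem.Int.floordiv_natCast]
  by_cases hpar : (i + j) % 2 = 1
  · have h0 : ¬(((i + j) % 2 : Nat) : Int) = 0 := by rw [hpar]; norm_num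
    rw [if_neg h0, if_pos hpar]
    unfold pvTot pvCnt
    by_cases hi2 : i % 2 = 1
    · have h1 : (((i % 2 : Nat)) : Int) = 1 := by rw [hi2]; norm_num
      have h2 : ¬i % 2 = 0 := by omega
      rw [if_pos h1]
      simp only [hi2, if_neg h2]
      push_cast
      ring
    · have h1 : ¬(((i % 2 : Nat)) : Int) = 1 := by
        intro h; exact hi2 (by exact_mod_cast h)
      have h2 : i % 2 = 0 := by omega
      rw [if_neg h1]
      simp only [h2]
      push_cast
      ring
  · have h0 : (i + j) % 2 = 0 := by omega
    have h0' : (((i + j) % 2 : Nat) : Int) = 0 := by rw [h0]; norm_num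
    rw [if_pos h0', if_neg hpar]

theorem alt_eq (n : Int) : generar_matriz_e_alt n = pvMat n.toNat 0 n.toNat := by
  unfold generar_matriz_e_alt pvMat
  rw [pyRange_cast, List.map_map]
  apply List.map_congr_left
  intro i hi
  rw [List.mem_range] at hi
  have hn : ((n.toNat : Nat) : Int) = n := by omega
  simp only [Function.comp, List.map_map]
  rw [if_pos hi]
  apply List.map_congr_left
  intro j hj
  rw [List.mem_range] at hj
  simp only [Function.comp, Int.ofNat_eq_natCast]
  conv_lhs => rw [← hn]
  exact valor_eq n.toNat i j hi hj

theorem init_eq (n : Int) :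
    ((PySem.List.pyRange 0 n 1).map (fun _ =>
      (PySem.List.pyRange 0 n 1).map (fun _ => (0 : Int)))) = pvMat n.toNat 0 0 := by
  unfold pvMat
  rw [pyRange_cast, List.map_map]
  apply List.map_congr_left
  intro i hi
  simp only [Function.comp, List.map_map]
  by_cases h0 : i = 0
  · subst h0
    simp [Function.comp_def, List.map_const']
  · simp [h0, Function.comp_def, List.map_const']

-- ===== VERDICT (by name: the statement is the Claim_ definition above) =====
theorem generar_matriz_e_spec : Claim_equal_generar_matriz_e := by
  intro n _
  unfold Spec_generar_matriz_e generar_matriz_e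
  simp only
  rw [init_eq n, pyRange_cast, alt_eq]
  rw [outer_loop n.toNat n.toNat (le_refl _)]
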